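-- pv_equiv track=rewrite | github.com/lucastuxnet/Bitcoin | Selfish/mineracao_egoista.py | contar_mineracoes_sequenciais_por_minerador
-- ===== SOURCE A (Python) =====
-- def contar_mineracoes_sequenciais_por_minerador(dados):
--     mineradores_sequenciais = {}
--     for minerador, poderes in dados.items():
--         sequencias = []
--         atual_sequencia = 0
--         for poder in poderes:
--             if poder > 0:
--                 atual_sequencia += 1
--             else:
--                 if atual_sequencia > 0:
--                     sequencias.append(atual_sequencia)
--                 atual_sequencia = 0
--         if atual_sequencia > 0:
--             sequencias.append(atual_sequencia)
--         mineradores_sequenciais[minerador] = sequencias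
--     return mineradores_sequenciais
-- ===== SOURCE B (Python) =====
-- def _runs(poderes):
--     # two-pointer scan: find each maximal block of positive powers and record its length
--     sequencias = []
--     n = len(poderes)
--     i = 0
--     while i < n:
--         if poderes[i] > 0:
--             j = i
--             while j < n and poderes[j] > 0:
--                 j += 1
--             sequencias.append(j - i)
--             i = j
--         else:
--             i += 1
--     return sequencias
--
-- def contar_mineracoes_sequenciais_por_minerador(dados):
--     return {minerador: _runs(poderes) for minerador, poderes in dados.items()}
-- ===== Notes on version B (the rewrite author's own statement) =====
-- stated objective: alternative
-- what changed: Replaces the accumulator/flush run-length loop with a two-pointer scan that jumps over each maximal positive block and records its length, and builds the result with a dict comprehension instead of mutation.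
import Mathlib
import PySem

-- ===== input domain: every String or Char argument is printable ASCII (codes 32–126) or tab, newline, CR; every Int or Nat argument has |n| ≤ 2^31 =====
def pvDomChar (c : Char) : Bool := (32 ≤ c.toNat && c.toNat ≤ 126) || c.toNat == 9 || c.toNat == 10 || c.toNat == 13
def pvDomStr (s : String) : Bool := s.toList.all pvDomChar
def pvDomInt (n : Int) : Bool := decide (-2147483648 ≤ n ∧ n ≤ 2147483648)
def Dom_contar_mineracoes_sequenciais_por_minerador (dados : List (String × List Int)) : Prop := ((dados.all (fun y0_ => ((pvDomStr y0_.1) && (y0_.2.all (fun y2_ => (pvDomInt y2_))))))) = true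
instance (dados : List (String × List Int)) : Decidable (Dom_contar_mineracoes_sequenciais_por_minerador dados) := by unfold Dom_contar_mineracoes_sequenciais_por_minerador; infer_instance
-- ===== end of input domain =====

-- B replaces A's accumulator/flush run-length loop with a two-pointer scan over each
-- miner's list and a dict comprehension (alternative decomposition, same cost).


-- ===== PORT A =====
-- inner loop of A: fold carrying (sequencias, atual_sequencia), then the final flush
def pvRunsA (poderes : List Int) : List Int :=
  let st := poderes.foldl
    (fun (st : List Int × Int) poder =>
      if poder > 0 then (st.1, st.2 + 1)
      else if st.2 > 0 then (st.1 ++ [st.2], 0) else (st.1, 0))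
    ([], 0)
  if st.2 > 0 then st.1 ++ [st.2] else st.1

def contar_mineracoes_sequenciais_por_minerador (dados : List (String × List Int)) : List (String × List Int) :=
  (dados.foldl (fun (d : PySem.Dict String (List Int)) mp => d.insert mp.1 (pvRunsA mp.2))
    PySem.Dict.empty).items

-- ===== PORT B =====
-- inner while loop of Source B: 'j = i; while j < n and poderes[j] > 0: j += 1'
def pvScanPos (p : List Int) (j : Nat) : Nat :=
  if h : j < p.length then
    if p[j] > 0 then pvScanPos p (j + 1) else j
  else j
termination_by p.length - j

theorem pvScanPos_ge (p : List Int) (j : Nat) : j ≤ pvScanPos p j := by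
  unfold pvScanPos
  split
  · split
    · exact le_trans (Nat.le_succ j) (pvScanPos_ge p (j + 1))
    · exact le_refl j
  · exact le_refl j
termination_by p.length - j

-- outer while loop of Source B's _runs
def pvRunsBgo (p : List Int) (i : Nat) : List Int :=
  if h : i < p.length then
    if hp : p[i] > 0 then
      let j := pvScanPos p i
      ((j - i : Nat) : Int) :: pvRunsBgo p j
    else pvRunsBgo p (i + 1)
  else []
termination_by p.length - i
decreasing_by
  · have h1 : i + 1 ≤ pvScanPos p (i + 1) := pvScanPos_ge p (i + 1)
    have h2 : pvScanPos p i = pvScanPos p (i + 1) := by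
      conv_lhs => rw [pvScanPos]
      simp [h, hp]
    omega
  · omega

def pvRunsB (poderes : List Int) : List Int := pvRunsBgo poderes 0

def contar_mineracoes_sequenciais_por_minerador_alt (dados : List (String × List Int)) : List (String × List Int) :=
  (dados.foldl (fun (d : PySem.Dict String (List Int)) mp => d.insert mp.1 (pvRunsB mp.2))
    PySem.Dict.empty).items

-- ===== PRECONDITION & SPEC =====
def Spec_contar_mineracoes_sequenciais_por_minerador (dados : List (String × List Int)) (out : List (String × List Int)) : Prop := out = contar_mineracoes_sequenciais_por_minerador_alt dados
instance (dados : List (String × List Int)) (out : List (String × List Int)) : Decidable (Spec_contar_mineracoes_sequenciais_por_minerador dados out) := by unfold Spec_contar_mineracoes_sequenciais_por_minerador; infer_instance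

-- ===== CLAIM (what is proved, stated in full; the proofs are below) =====
def Claim_equal_contar_mineracoes_sequenciais_por_minerador : Prop := ∀ (dados : List (String × List Int)), Dom_contar_mineracoes_sequenciais_por_minerador dados → Spec_contar_mineracoes_sequenciais_por_minerador dados (contar_mineracoes_sequenciais_por_minerador dados)

-- ===== LEMMAS AND PROOFS =====

-- reference recursion: runs of positives, carrying a pending run of length c
def pvF (c : Int) : List Int → List Int
  | [] => if c > 0 then [c] else []
  | x :: xs => if x > 0 then pvF (c + 1) xs else if c > 0 then c :: pvF 0 xs else pvF 0 xs

theorem pvRunsA_eq_pvF (p : List Int) : ∀ (seqs : List Int) (c : Int),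
    (let st := p.foldl
      (fun (st : List Int × Int) poder =>
        if poder > 0 then (st.1, st.2 + 1)
        else if st.2 > 0 then (st.1 ++ [st.2], 0) else (st.1, 0))
      (seqs, c)
     if st.2 > 0 then st.1 ++ [st.2] else st.1) = seqs ++ pvF c p := by
  induction p with
  | nil => intro seqs c; by_cases hc : c > 0 <;> simp [pvF, hc]
  | cons x xs ih =>
    intro seqs c
    by_cases hx : x > 0
    · simpa [pvF, hx] using ih seqs (c + 1)
    · by_cases hc : c > 0 <;> simp [pvF, hx, hc, ih]

theorem pvScanPos_le (p : List Int) (j : Nat) (h : j ≤ p.length) : pvScanPos p j ≤ p.length := by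
  unfold pvScanPos
  split
  · split
    · exact pvScanPos_le p (j + 1) (by omega)
    · exact h
  · exact h
termination_by p.length - j

theorem pvScanPos_stop (p : List Int) (j : Nat) (h : j < p.length) (hp : ¬ p[j] > 0) :
    pvScanPos p j = j := by
  unfold pvScanPos; simp [h, hp]

theorem pvScanPos_step (p : List Int) (j : Nat) (h : j < p.length) (hp : p[j] > 0) :
    pvScanPos p j = pvScanPos p (j + 1) := by
  conv_lhs => rw [pvScanPos]
  simp [h, hp]

theorem pvDropCons {α : Type} (p : List α) (i : Nat) (h : i < p.length) :
    p.drop i = p[i] :: p.drop (i + 1) := List.drop_eq_getElem_cons h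

theorem pvF_drop (p : List Int) (i : Nat) (c : Int) (hc : c > 0) (hi : i ≤ p.length) :
    pvF c (p.drop i) = (c + ((pvScanPos p i - i : Nat) : Int)) :: pvF 0 (p.drop (pvScanPos p i)) := by
  by_cases h : i < p.length
  · rw [pvDropCons p i h]
    by_cases hp : p[i] > 0
    · rw [pvScanPos_step p i h hp]
      have hge := pvScanPos_ge p (i + 1)
      have := pvF_drop p (i + 1) (c + 1) (by omega) (by omega)
      rw [pvF, if_pos hp, this]
      congr 1
      have : (pvScanPos p (i+1) - i : Nat) = (pvScanPos p (i+1) - (i+1) : Nat) + 1 := by omega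
      rw [this]
      push_cast
      ring
    · rw [pvScanPos_stop p i h hp]
      rw [pvF, if_neg hp, if_pos hc]
      have h0 : pvF 0 (p.drop i) = pvF 0 (p.drop (i + 1)) := by
        rw [pvDropCons p i h, pvF, if_neg hp]
        norm_num
      rw [h0]
      norm_num
  · have hlen : i = p.length := by omega
    have hdrop : p.drop i = [] := by simp [hlen]
    have hsc : pvScanPos p i = i := by unfold pvScanPos; simp [h]
    rw [hdrop, hsc, hdrop]
    simp [pvF, hc]
termination_by p.length - i
decreasing_by
  have := pvScanPos_ge p (i + 1); omega

theorem pvRunsBgo_eq_pvF (p : List Int) (i : Nat) (hi : i ≤ p.length) :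
    pvRunsBgo p i = pvF 0 (p.drop i) := by
  by_cases h : i < p.length
  · by_cases hp : p[i] > 0
    · rw [pvRunsBgo]
      simp only [h, hp, dif_pos]
      rw [pvScanPos_step p i h hp]
      have hge := pvScanPos_ge p (i + 1)
      have hle := pvScanPos_le p (i + 1) (by omega)
      rw [pvRunsBgo_eq_pvF p (pvScanPos p (i + 1)) (by omega)]
      rw [pvDropCons p i h, pvF, if_pos hp,
          pvF_drop p (i + 1) (0 + 1) (by omega) (by omega)]
      congr 1
      have : (pvScanPos p (i+1) - i : Nat) = (pvScanPos p (i+1) - (i+1) : Nat) + 1 := by omega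
      rw [this]
      push_cast
      ring
    · rw [pvRunsBgo]
      simp only [h, hp, dif_pos]
      rw [pvRunsBgo_eq_pvF p (i + 1) (by omega)]
      rw [pvDropCons p i h, pvF, if_neg hp]
      norm_num
  · have hi' : i = p.length := by omega
    have hdrop : p.drop i = [] := by simp [hi']
    rw [pvRunsBgo, hdrop]
    simp [h, pvF]
termination_by p.length - i
decreasing_by
  · have := pvScanPos_ge p (i + 1); omega
  · omega

theorem pvRuns_eq (p : List Int) : pvRunsA p = pvRunsB p := by
  rw [pvRunsA, pvRunsB, pvRunsBgo_eq_pvF p 0 (by omega)]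
  simpa using pvRunsA_eq_pvF p [] 0

-- ===== VERDICT (by name: the statement is the Claim_ definition above) =====
theorem contar_mineracoes_sequenciais_por_minerador_spec : Claim_equal_contar_mineracoes_sequenciais_por_minerador := by
  intro dados _
  unfold Spec_contar_mineracoes_sequenciais_por_minerador
  unfold contar_mineracoes_sequenciais_por_minerador contar_mineracoes_sequenciais_por_minerador_alt
  congr 1
  apply PySem.List.foldl_congr_mem
  intro d mp _
  rw [pvRuns_eq]
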